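-- pv_equiv track=rewrite | github.com/JHAMILCALI/MATERIAL_INFORMATICA | PRIMER SEMESTRE/INF-111 PROGRAMACION 1/LABORATORIO/LABORATORIO 10/Ejercio 4.py | elivocmqj
-- ===== SOURCE A (Python) =====
-- def esvocalmqj(wmqj):
--     kmqj=0
--     if wmqj=="a" or wmqj=="e" or wmqj=="i" or wmqj=="o" or wmqj=="u":
--         kmqj=1
--     return kmqj
--
-- def elivocmqj(wmqj,kmqj):
--     cmqj=0;vmqj=""
--     elemqj = len(wmqj)
--     for imqj in range(1,elemqj+1):
--         ymqj = wmqj[imqj-1:imqj]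
--         if esvocalmqj(ymqj)==1:
--             cmqj=cmqj+1
--             if cmqj==kmqj:
--                 ymqj=""
--         vmqj = vmqj + ymqj
--     return vmqj
-- ===== SOURCE B (Python) =====
-- def elivocmqj(wmqj, kmqj):
--     idx = None
--     cnt = 0
--     for i, ch in enumerate(wmqj):
--         if ch in "aeiou":
--             cnt += 1
--             if cnt == kmqj:
--                 idx = i
--                 break
--     if idx is None:
--         return wmqj
--     return wmqj[:idx] + wmqj[idx + 1:]
-- ===== Notes on version B (the rewrite author's own statement) =====
-- stated objective: faster
-- what changed: B finds the index of the k-th vowel in one scan with an early break and returns the result by slicing s[:idx]+s[idx+1:], instead of A's per-character substring extraction and quadratic string concatenation of every kept character.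
import Mathlib
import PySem

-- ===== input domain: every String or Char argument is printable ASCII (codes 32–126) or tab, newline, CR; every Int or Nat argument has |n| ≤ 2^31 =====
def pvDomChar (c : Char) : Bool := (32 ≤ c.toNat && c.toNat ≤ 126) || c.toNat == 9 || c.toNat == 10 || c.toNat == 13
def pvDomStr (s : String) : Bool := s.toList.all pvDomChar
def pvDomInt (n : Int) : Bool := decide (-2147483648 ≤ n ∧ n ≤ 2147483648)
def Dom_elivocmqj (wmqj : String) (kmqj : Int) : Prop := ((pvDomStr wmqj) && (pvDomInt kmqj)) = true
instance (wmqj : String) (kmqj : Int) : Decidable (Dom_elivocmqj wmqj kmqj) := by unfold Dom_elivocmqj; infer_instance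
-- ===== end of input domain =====

-- B removes the k-th vowel by locating its index in one scan (early exit) and slicing,
-- instead of A's rebuild of the string by per-character slicing and concatenation. Same return value on every input.

-- ===== PORT A =====
-- esvocalmqj: its argument in A is the one-character slice w[i-1:i], so here a List Char
def esvocalmqjA (wmqj : List Char) : Int :=
  if wmqj = ['a'] ∨ wmqj = ['e'] ∨ wmqj = ['i'] ∨ wmqj = ['o'] ∨ wmqj = ['u'] then 1 else 0

def elivocmqj (wmqj : String) (kmqj : Int) : String :=
  let cs := wmqj.toList
  let st := (PySem.List.pyRange 1 ((cs.length : Int) + 1) 1).foldl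
    (fun (st : Int × List Char) imqj =>
      let ymqj := PySem.List.slice cs (some (imqj - 1)) (some imqj)
      if esvocalmqjA ymqj = 1 then
        let c := st.1 + 1
        if c = kmqj then (c, st.2)          -- ymqj = "" : append nothing
        else (c, st.2 ++ ymqj)
      else (st.1, st.2 ++ ymqj)) (0, [])
  String.ofList st.2

-- ===== PORT B =====
-- the enumerate loop of Source B with its break: returns the index of the k-th vowel, if any
def scanKth (cs : List Char) (cnt kmqj : Int) : Option Nat :=
  match cs with
  | [] => none
  | x :: xs =>
    if x = 'a' ∨ x = 'e' ∨ x = 'i' ∨ x = 'o' ∨ x = 'u' then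
      if cnt + 1 = kmqj then some 0
      else (scanKth xs (cnt + 1) kmqj).map (· + 1)
    else (scanKth xs cnt kmqj).map (· + 1)

def elivocmqj_alt (wmqj : String) (kmqj : Int) : String :=
  match scanKth wmqj.toList 0 kmqj with
  | none => wmqj
  | some i =>
      String.ofList (PySem.List.slice wmqj.toList none (some (i : Int)) ++
                 PySem.List.slice wmqj.toList (some ((i : Int) + 1)) none)

-- ===== PRECONDITION & SPEC =====
def Spec_elivocmqj (wmqj : String) (kmqj : Int) (out : String) : Prop := out = elivocmqj_alt wmqj kmqj
instance (wmqj : String) (kmqj : Int) (out : String) : Decidable (Spec_elivocmqj wmqj kmqj out) := by unfold Spec_elivocmqj; infer_instance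

-- ===== CLAIM (what is proved, stated in full; the proofs are below) =====
def Claim_equal_elivocmqj : Prop := ∀ (wmqj : String) (kmqj : Int), Dom_elivocmqj wmqj kmqj → Spec_elivocmqj wmqj kmqj (elivocmqj wmqj kmqj)

-- ===== LEMMAS AND PROOFS =====

-- characterisation of A's loop over the remaining suffix: (final counter, characters it emits)
def aLoopP (cs : List Char) (c kmqj : Int) : Int × List Char :=
  match cs with
  | [] => (c, [])
  | x :: xs =>
    if x = 'a' ∨ x = 'e' ∨ x = 'i' ∨ x = 'o' ∨ x = 'u' then
      let r := aLoopP xs (c + 1) kmqj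
      if c + 1 = kmqj then (r.1, r.2) else (r.1, x :: r.2)
    else
      let r := aLoopP xs c kmqj
      (r.1, x :: r.2)

theorem esvocal_singleton (x : Char) :
    esvocalmqjA [x] = 1 ↔ (x = 'a' ∨ x = 'e' ∨ x = 'i' ∨ x = 'o' ∨ x = 'u') := by
  simp only [esvocalmqjA, List.cons.injEq, and_true]
  split_ifs with h
  · simpa using h
  · simpa using h

theorem esvocal_singleton_ne (x : Char)
    (h : ¬ (x = 'a' ∨ x = 'e' ∨ x = 'i' ∨ x = 'o' ∨ x = 'u')) : esvocalmqjA [x] = 0 := by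
  simp only [esvocalmqjA, List.cons.injEq, and_true]
  rw [if_neg]
  simpa using h

-- once the counter has reached (or passed) k, A keeps every remaining character
theorem aLoopP_ge (cs : List Char) (c kmqj : Int) (h : kmqj ≤ c) :
    (aLoopP cs c kmqj).2 = cs := by
  induction cs generalizing c with
  | nil => simp [aLoopP]
  | cons x xs ih =>
    unfold aLoopP
    by_cases hv : x = 'a' ∨ x = 'e' ∨ x = 'i' ∨ x = 'o' ∨ x = 'u'
    · rw [if_pos hv, if_neg (by omega)]
      simp [ih (c + 1) (by omega)]
    · rw [if_neg hv]
      simp [ih c h]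

theorem slice_one (pre : List Char) (x : Char) (xs : List Char) :
    PySem.List.slice (pre ++ x :: xs) (some (pre.length : Int)) (some ((pre.length : Int) + 1)) = [x] := by
  rw [PySem.List.slice_toNat (ha := by positivity) (hb := by positivity)]
  have h1 : ((pre.length : Int)).toNat = pre.length := by omega
  have h2 : ((pre.length : Int) + 1).toNat = pre.length + 1 := by omega
  rw [h1, h2, List.drop_append_of_le_length (by omega)]
  simp

theorem loopA (ds pre : List Char) (c kmqj : Int) (v : List Char) :
    (PySem.List.pyRange ((pre.length : Int) + 1) (((pre ++ ds).length : Int) + 1) 1).foldl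
      (fun (st : Int × List Char) imqj =>
        let ymqj := PySem.List.slice (pre ++ ds) (some (imqj - 1)) (some imqj)
        if esvocalmqjA ymqj = 1 then
          let cc := st.1 + 1
          if cc = kmqj then (cc, st.2) else (cc, st.2 ++ ymqj)
        else (st.1, st.2 ++ ymqj)) (c, v)
    = ((aLoopP ds c kmqj).1, v ++ (aLoopP ds c kmqj).2) := by
  induction ds generalizing pre c v with
  | nil => simp [aLoopP, PySem.List.pyRange_one_eq_nil]
  | cons x xs ih =>
    rw [PySem.List.pyRange_one_cons (by simp)]
    simp only [List.foldl_cons]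
    have hy : PySem.List.slice (pre ++ x :: xs) (some ((pre.length : Int) + 1 - 1))
        (some ((pre.length : Int) + 1)) = [x] := by
      simpa using slice_one pre x xs
    have hrec := ih (pre ++ [x])
    simp only [List.append_assoc, List.cons_append, List.nil_append,
      List.length_append, List.length_cons, List.length_nil] at hrec
    push_cast at hrec
    simp only [List.length_append, List.length_cons] at *
    push_cast
    by_cases hv : x = 'a' ∨ x = 'e' ∨ x = 'i' ∨ x = 'o' ∨ x = 'u'
    · have hE := (esvocal_singleton x).2 hv
      by_cases hk : c + 1 = kmqj
      · simp only [hy, hE, reduceIte]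
        rw [if_pos hk, hrec (c + 1) v]
        simp [aLoopP, hv, hk]
      · simp only [hy, hE, reduceIte]
        rw [if_neg hk, hrec (c + 1) (v ++ [x])]
        simp [aLoopP, hv, hk]
    · have hE := esvocal_singleton_ne x hv
      simp only [hy, hE]
      rw [if_neg (by norm_num : ¬ (0 : Int) = 1), hrec c (v ++ [x])]
      simp [aLoopP, hv]

theorem elivocmqj_eq_aLoopP (wmqj : String) (kmqj : Int) :
    elivocmqj wmqj kmqj = String.ofList (aLoopP wmqj.toList 0 kmqj).2 := by
  unfold elivocmqj
  have := loopA wmqj.toList [] 0 kmqj []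
  simp only [List.nil_append, List.length_nil, Nat.cast_zero, zero_add] at this
  simp only [this]

theorem scanKth_none (cs : List Char) (c kmqj : Int)
    (h : scanKth cs c kmqj = none) : (aLoopP cs c kmqj).2 = cs := by
  induction cs generalizing c with
  | nil => simp [aLoopP]
  | cons x xs ih =>
    unfold scanKth at h
    unfold aLoopP
    by_cases hv : x = 'a' ∨ x = 'e' ∨ x = 'i' ∨ x = 'o' ∨ x = 'u'
    · rw [if_pos hv] at h
      by_cases hk : c + 1 = kmqj
      · simp [hk] at h
      · rw [if_neg hk, Option.map_eq_none_iff] at h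
        simp [hv, hk, ih _ h]
    · rw [if_neg hv, Option.map_eq_none_iff] at h
      simp [hv, ih _ h]

theorem scanKth_some (cs : List Char) (c kmqj : Int) (i : Nat)
    (h : scanKth cs c kmqj = some i) :
    (aLoopP cs c kmqj).2 = cs.take i ++ cs.drop (i + 1) := by
  induction cs generalizing c i with
  | nil => simp [scanKth] at h
  | cons x xs ih =>
    unfold scanKth at h
    unfold aLoopP
    by_cases hv : x = 'a' ∨ x = 'e' ∨ x = 'i' ∨ x = 'o' ∨ x = 'u'
    · rw [if_pos hv] at h
      by_cases hk : c + 1 = kmqj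
      · rw [if_pos hk] at h
        obtain rfl : i = 0 := by simpa using h.symm
        simp [hv, hk, aLoopP_ge xs kmqj kmqj le_rfl]
      · rw [if_neg hk, Option.map_eq_some_iff] at h
        obtain ⟨j, hj, rfl⟩ := h
        simp [hv, hk, ih _ _ hj]
    · rw [if_neg hv, Option.map_eq_some_iff] at h
      obtain ⟨j, hj, rfl⟩ := h
      simp [hv, ih _ _ hj]

-- ===== VERDICT (by name: the statement is the Claim_ definition above) =====
theorem elivocmqj_spec : Claim_equal_elivocmqj := by
  intro wmqj kmqj _
  unfold Spec_elivocmqj elivocmqj_alt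
  rw [elivocmqj_eq_aLoopP]
  cases h : scanKth wmqj.toList 0 kmqj with
  | none => rw [scanKth_none _ _ _ h]; exact String.ofList_toList
  | some i =>
    dsimp only
    rw [scanKth_some _ _ _ _ h,
        PySem.List.slice_to (hb := by omega),
        PySem.List.slice_from (ha := by omega)]
    have h1 : ((i : Int)).toNat = i := by omega
    have h2 : ((i : Int) + 1).toNat = i + 1 := by omega
    rw [h1, h2]
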